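-- pv_equiv track=rewrite | github.com/rlanahyun/Dashboard | visualization/metrics_viz.py | find_default_metric
-- ===== SOURCE A (Python) =====
-- from typing import List, Dict, Tuple, Optional, Any
--
-- def find_default_metric(metric_columns: List[str],
--                        priority_metrics: Optional[List[str]] = None) -> Optional[str]:
--     """
--     우선순위에 따른 기본 지표 찾기.
--
--     Args:
--         metric_columns: 지표 열 목록
--         priority_metrics: 우선순위 지표 목록
--
--     Returns:
--         기본 지표 이름 또는 None
--     """
--     if priority_metrics is None:
--         priority_metrics = ['PCK 1', 'PCK 2', 'ICC', 'Pearson']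
--
--     default_metric = None
--
--     # 우선순위 지표 중 첫 번째로 매칭되는 것 찾기
--     for pattern in priority_metrics:
--         matching = [col for col in metric_columns if pattern in col]
--         if matching:
--             default_metric = matching[0]
--             break
--
--     # 매칭되는 것이 없으면 첫 번째 지표 사용
--     if default_metric is None and metric_columns:
--         default_metric = metric_columns[0]
--
--     return default_metric
-- ===== SOURCE B (Python) =====
-- def find_default_metric(metric_columns, priority_metrics=None):
--     if priority_metrics is None:
--         priority_metrics = ['PCK 1', 'PCK 2', 'ICC', 'Pearson']
--     n = len(priority_metrics)
--     best = None  # (rank of best pattern matched, column)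
--     for col in metric_columns:
--         rank = next((i for i, p in enumerate(priority_metrics) if p in col), n)
--         if rank < n and (best is None or rank < best[0]):
--             best = (rank, col)
--             if rank == 0:
--                 break  # cannot be beaten: top-priority pattern, earliest such column
--     if best is not None:
--         return best[1]
--     return metric_columns[0] if metric_columns else None
-- ===== Notes on version B (the rewrite author's own statement) =====
-- stated objective: alternative
-- what changed: A loops over the priority patterns and rebuilds a filtered column list for each; B makes a single pass over the columns, ranking each column by the index of the first priority pattern it contains and keeping the column with the minimal (rank, position).
import Mathlib
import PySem

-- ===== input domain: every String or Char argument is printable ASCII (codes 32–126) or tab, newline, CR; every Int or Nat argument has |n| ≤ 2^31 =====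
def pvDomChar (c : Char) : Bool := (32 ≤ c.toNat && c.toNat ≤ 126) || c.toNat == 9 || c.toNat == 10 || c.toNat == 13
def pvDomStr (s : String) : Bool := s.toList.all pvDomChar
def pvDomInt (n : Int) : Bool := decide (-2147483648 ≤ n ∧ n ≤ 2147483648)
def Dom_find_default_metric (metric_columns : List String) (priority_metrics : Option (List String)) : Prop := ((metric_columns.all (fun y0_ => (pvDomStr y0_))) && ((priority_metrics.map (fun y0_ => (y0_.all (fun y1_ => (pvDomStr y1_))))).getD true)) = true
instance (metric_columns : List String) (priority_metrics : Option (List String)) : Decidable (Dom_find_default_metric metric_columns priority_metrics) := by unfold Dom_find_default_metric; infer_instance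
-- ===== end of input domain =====

-- B replaces A's pattern-outer double loop by a single pass over the columns that
-- tracks the column with the minimal (pattern-rank, position); objective: alternative decomposition.

-- ===== PORT A =====
-- A's loop over the priority patterns: first pattern whose filtered column list is nonempty.
def pvLoopA (cols : List String) : List String → Option String
  | [] => none
  | p :: rest =>
    match cols.filter (fun c => PySem.Str.isIn p c) with
    | m :: _ => some m
    | [] => pvLoopA cols rest

def find_default_metric (metric_columns : List String) (priority_metrics : Option (List String)) : Option String :=
  let pats := match priority_metrics with
    | none => ["PCK 1", "PCK 2", "ICC", "Pearson"]
    | some l => l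
  match pvLoopA metric_columns pats with
  | some m => some m
  | none => metric_columns.head?

-- ===== PORT B =====
-- rank of a column: index of the first priority pattern contained in it (pats.length if none).
def pvRank (pats : List String) (c : String) : Nat :=
  pats.findIdx (fun p => PySem.Str.isIn p c)

def pvGo (pats : List String) (n : Nat) (best : Option (Nat × String)) : List String → Option (Nat × String)
  | [] => best
  | c :: cs =>
    let r := pvRank pats c
    match best with
    | none =>
      if r < n then
        (if r = 0 then some (r, c) else pvGo pats n (some (r, c)) cs)
      else pvGo pats n none cs
    | some b =>
      if r < n ∧ r < b.1 then
        (if r = 0 then some (r, c) else pvGo pats n (some (r, c)) cs)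
      else pvGo pats n (some b) cs

def find_default_metric_alt (metric_columns : List String) (priority_metrics : Option (List String)) : Option String :=
  let pats := match priority_metrics with
    | none => ["PCK 1", "PCK 2", "ICC", "Pearson"]
    | some l => l
  let n := pats.length
  match pvGo pats n none metric_columns with
  | some b => some b.2
  | none => metric_columns.head?

-- ===== PRECONDITION & SPEC =====
def Spec_find_default_metric (metric_columns : List String) (priority_metrics : Option (List String)) (out : Option String) : Prop := out = find_default_metric_alt metric_columns priority_metrics
instance (metric_columns : List String) (priority_metrics : Option (List String)) (out : Option String) : Decidable (Spec_find_default_metric metric_columns priority_metrics out) := by unfold Spec_find_default_metric; infer_instance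

-- ===== CLAIM (what is proved, stated in full; the proofs are below) =====
def Claim_equal_find_default_metric : Prop := ∀ (metric_columns : List String) (priority_metrics : Option (List String)), Dom_find_default_metric metric_columns priority_metrics → Spec_find_default_metric metric_columns priority_metrics (find_default_metric metric_columns priority_metrics)

-- ===== LEMMAS AND PROOFS =====

-- one step of B's single pass: keep the best (rank, column), strictly smaller rank wins.
def pvStep (pats : List String) (n : Nat) (best : Option (Nat × String)) (c : String) :
    Option (Nat × String) :=
  let r := pvRank pats c
  match best with
  | none => if r < n then some (r, c) else none
  | some b => if r < n ∧ r < b.1 then some (r, c) else some b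

-- B's loop with its early exit: stop as soon as a rank-0 column is kept.

-- right-recursive specification of B's pass: the pair with minimal (rank, position).
def pvSel (pats : List String) : List String → Option (Nat × String)
  | [] => none
  | c :: cs =>
    let r := pvRank pats c
    if r < pats.length then
      match pvSel pats cs with
      | none => some (r, c)
      | some b => if b.1 < r then some b else some (r, c)
    else pvSel pats cs

def pvMerge (b : Option (Nat × String)) (o : Option (Nat × String)) : Option (Nat × String) :=
  match o with
  | none => b
  | some x =>
    match b with
    | none => some x
    | some y => if x.1 < y.1 then some x else some y

theorem pvMerge_step (pats : List String) (b : Option (Nat × String)) (c : String) (cs : List String) :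
    pvMerge (pvStep pats pats.length b c) (pvSel pats cs) = pvMerge b (pvSel pats (c :: cs)) := by
  cases b with
  | none =>
    cases hsel : pvSel pats cs with
    | none =>
      by_cases hr : pvRank pats c < pats.length <;>
        simp [pvStep, pvSel, pvMerge, hsel, hr]
    | some x =>
      by_cases hr : pvRank pats c < pats.length
      · by_cases hx : x.1 < pvRank pats c <;>
          simp [pvStep, pvSel, pvMerge, hsel, hr, hx]
      · simp [pvStep, pvSel, pvMerge, hsel, hr]
  | some y =>
    cases hsel : pvSel pats cs with
    | none =>
      by_cases hr : pvRank pats c < pats.length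
      · by_cases hy : pvRank pats c < y.1 <;>
          simp [pvStep, pvSel, pvMerge, hsel, hr, hy]
      · simp [pvStep, pvSel, pvMerge, hsel, hr]
    | some x =>
      by_cases hr : pvRank pats c < pats.length
      · by_cases hy : pvRank pats c < y.1 <;> by_cases hx : x.1 < pvRank pats c <;>
          by_cases hxy : x.1 < y.1 <;>
          simp [pvStep, pvSel, pvMerge, hsel, hr, hy, hx, hxy] <;> omega
      · simp [pvStep, pvSel, pvMerge, hsel, hr]

theorem pvMerge_zero (m : String) (o : Option (Nat × String)) :
    pvMerge (some (0, m)) o = some (0, m) := by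
  cases o <;> simp [pvMerge]

theorem pvGo_eq_merge_sel (pats : List String) (cols : List String) :
    ∀ b, pvGo pats pats.length b cols = pvMerge b (pvSel pats cols) := by
  induction cols with
  | nil => intro b; rfl
  | cons c cs ih =>
    intro b
    rw [← pvMerge_step]
    have hstep : pvGo pats pats.length b (c :: cs) =
        pvGo pats pats.length (pvStep pats pats.length b c) cs ∨
        (pvRank pats c = 0 ∧ pvGo pats pats.length b (c :: cs) = pvStep pats pats.length b c ∧
          pvStep pats pats.length b c = some (0, c)) := by
      cases b with
      | none =>
        by_cases hr : pvRank pats c < pats.length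
        · by_cases h0 : pvRank pats c = 0
          · have hp : 0 < pats.length := by omega
            right
            refine ⟨h0, ?_, ?_⟩ <;> simp [pvGo, pvStep, h0, hp]
          · left; simp [pvGo, pvStep, hr, h0]
        · left; simp [pvGo, pvStep, hr]
      | some y =>
        by_cases hr : pvRank pats c < pats.length ∧ pvRank pats c < y.1
        · by_cases h0 : pvRank pats c = 0
          · have hp : 0 < pats.length := by omega
            have hy : 0 < y.1 := by omega
            right
            refine ⟨h0, ?_, ?_⟩ <;> simp [pvGo, pvStep, h0, hp, hy]
          · left; simp [pvGo, pvStep, hr, h0]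
        · left; simp [pvGo, pvStep, hr]
    rcases hstep with h | ⟨h0, h1, h2⟩
    · rw [h, ih]
    · rw [h1, h2, pvMerge_zero]

theorem pvSel_nil_pats (cols : List String) : pvSel [] cols = none := by
  induction cols with
  | nil => rfl
  | cons c cs ih => simp [pvSel, ih]

theorem pvSel_found (p : String) (rest cols : List String) (m : String)
    (h : cols.find? (fun c => PySem.Str.isIn p c) = some m) :
    pvSel (p :: rest) cols = some (0, m) := by
  induction cols with
  | nil => simp at h
  | cons c cs ih =>
    rw [List.find?_cons] at h
    by_cases hc : PySem.Str.isIn p c = true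
    · rw [hc] at h
      simp only [Option.some.injEq] at h
      subst h
      simp only [pvSel, pvRank, List.findIdx_cons, hc, cond_true,
        List.length_cons, Nat.succ_pos, if_pos]
      cases pvSel (p :: rest) cs <;> simp
    · rw [Bool.not_eq_true] at hc
      rw [hc] at h
      have hcs := ih h
      simp only [pvSel, pvRank, List.findIdx_cons, hc, cond_false, hcs,
        List.length_cons]
      split_ifs with h1 h2
      · rfl
      · exact absurd (Nat.succ_pos _) h2
      · rfl

theorem pvSel_shift (p : String) (rest cols : List String)
    (h : ∀ c ∈ cols, PySem.Str.isIn p c = false) :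
    pvSel (p :: rest) cols = (pvSel rest cols).map (fun b => (b.1 + 1, b.2)) := by
  induction cols with
  | nil => rfl
  | cons c cs ih =>
    have hc := h c (List.mem_cons_self ..)
    have ih' := ih (fun x hx => h x (List.mem_cons_of_mem _ hx))
    simp only [pvSel, pvRank, List.findIdx_cons, hc, cond_false, ih', List.length_cons]
    by_cases hr : (rest.findIdx fun p => PySem.Str.isIn p c) < rest.length
    · simp only [if_pos (by omega : (rest.findIdx fun p => PySem.Str.isIn p c) + 1 < rest.length + 1), if_pos hr]
      cases pvSel rest cs <;> simp <;> split_ifs <;> simp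
    · simp only [if_neg (by omega : ¬ ((rest.findIdx fun p => PySem.Str.isIn p c) + 1 < rest.length + 1)), if_neg hr]

theorem pvFind?_of_filter (p : String → Bool) (l : List String) (m : String) (t : List String)
    (h : l.filter p = m :: t) : l.find? p = some m := by
  induction l generalizing t with
  | nil => simp at h
  | cons c cs ih =>
    rw [List.filter_cons] at h
    by_cases hc : p c = true
    · simp only [hc, if_pos] at h
      obtain ⟨rfl, -⟩ := List.cons.injEq .. ▸ h
      simp [hc]
    · simp only [hc, if_neg, Bool.false_eq_true, not_false_iff] at h
      simp [hc]
      exact ih _ h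

theorem pvLoopA_eq_sel (pats cols : List String) :
    pvLoopA cols pats = (pvSel pats cols).map Prod.snd := by
  induction pats with
  | nil => simp [pvLoopA, pvSel_nil_pats]
  | cons p rest ih =>
    cases hf : cols.filter (fun c => PySem.Str.isIn p c) with
    | cons m t =>
      rw [pvSel_found p rest cols m (pvFind?_of_filter _ _ _ _ hf)]
      simp only [pvLoopA]
      rw [hf]
      rfl
    | nil =>
      have hno : ∀ c ∈ cols, PySem.Str.isIn p c = false := by
        intro c hcin
        have := List.filter_eq_nil_iff.mp hf c hcin
        simpa using this
      rw [pvSel_shift p rest cols hno]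
      simp only [pvLoopA]
      rw [hf]
      simp only [ih, Option.map_map]
      rfl

theorem pvMain (pats cols : List String) :
    (match pvLoopA cols pats with | some m => some m | none => cols.head?) =
    (match pvGo pats pats.length none cols with | some b => some b.2 | none => cols.head?) := by
  rw [pvGo_eq_merge_sel, pvLoopA_eq_sel]
  cases pvSel pats cols <;> rfl

-- ===== VERDICT (by name: the statement is the Claim_ definition above) =====
theorem find_default_metric_spec : Claim_equal_find_default_metric := by
  intro cols pm _
  unfold Spec_find_default_metric find_default_metric find_default_metric_alt
  cases pm <;> exact pvMain _ _
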